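-- pv_equiv track=rewrite | github.com/Cloudwith-mo/omega-fx-v2 | scripts/backtest_splash_pass.py | _parse_symbols
-- ===== SOURCE A (Python) =====
-- from typing import Dict, List, Optional, Tuple
--
-- def _parse_symbols(raw: str) -> List[str]:
--     parts: List[str] = []
--     for chunk in raw.replace(";", ",").replace("|", ",").split(","):
--         chunk = chunk.strip()
--         if not chunk:
--             continue
--         for token in chunk.split():
--             if token:
--                 parts.append(token.upper())
--     return parts
-- ===== SOURCE B (Python) =====
-- from typing import List
--
-- def _parse_symbols(raw: str) -> List[str]:
--     parts: List[str] = []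
--     cur: List[str] = []
--     for ch in raw:
--         if ch in ";|," or ch.isspace():
--             if cur:
--                 parts.append("".join(cur).upper())
--                 cur = []
--         else:
--             cur.append(ch)
--     if cur:
--         parts.append("".join(cur).upper())
--     return parts
-- ===== Notes on version B (the rewrite author's own statement) =====
-- stated objective: alternative
-- what changed: Replaces A's delimiter-normalization (two replace passes, a comma split, per-chunk strip and whitespace split) with a single character-by-character scan that accumulates the current token and flushes it at any delimiter or whitespace.
import Mathlib
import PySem

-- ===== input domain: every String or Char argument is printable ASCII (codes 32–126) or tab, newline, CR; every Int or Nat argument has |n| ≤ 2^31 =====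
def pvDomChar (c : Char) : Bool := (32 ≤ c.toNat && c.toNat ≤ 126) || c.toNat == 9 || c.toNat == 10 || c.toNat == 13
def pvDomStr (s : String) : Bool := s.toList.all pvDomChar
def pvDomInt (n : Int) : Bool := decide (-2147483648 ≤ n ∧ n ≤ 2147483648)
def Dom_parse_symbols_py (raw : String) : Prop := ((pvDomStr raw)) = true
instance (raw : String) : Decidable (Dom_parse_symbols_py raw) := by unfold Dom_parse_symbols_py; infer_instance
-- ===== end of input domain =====

-- B replaces A's normalize-then-split pipeline (two replaces, comma split, per-chunk strip and whitespace split) by a single character scan; return values proved equal (objective: alternative, not faster).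

-- ===== PORT A =====
def parse_symbols_py (raw : String) : List String :=
  (PySem.Chars.splitOn
      (PySem.Chars.replace (PySem.Chars.replace raw.toList [';'] [',']) ['|'] [','])
      [',']).foldl
    (fun parts chunk =>
      let chunk2 := PySem.Chars.strip chunk
      if chunk2 = [] then parts
      else (PySem.Chars.split₀ chunk2).foldl
        (fun parts token =>
          if token = [] then parts
          else parts ++ [String.ofList (PySem.Chars.upper token)])
        parts)
    []

-- ===== PORT B =====
-- helper for B: one pass over the characters; `cur` is the token in progress
def parse_symbols_py_alt_go : List Char → List Char → List String → List String
  | [], cur, parts =>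
      if cur = [] then parts else parts ++ [String.ofList (PySem.Chars.upper cur)]
  | c :: rest, cur, parts =>
      if [';', '|', ','].contains c || PySem.Chars.isspace c then
        parse_symbols_py_alt_go rest []
          (if cur = [] then parts else parts ++ [String.ofList (PySem.Chars.upper cur)])
      else
        parse_symbols_py_alt_go rest (cur ++ [c]) parts

def parse_symbols_py_alt (raw : String) : List String :=
  parse_symbols_py_alt_go raw.toList [] []

-- ===== PRECONDITION & SPEC =====
def Spec_parse_symbols_py (raw : String) (out : List String) : Prop := out = parse_symbols_py_alt raw
instance (raw : String) (out : List String) : Decidable (Spec_parse_symbols_py raw out) := by unfold Spec_parse_symbols_py; infer_instance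

-- ===== CLAIM (what is proved, stated in full; the proofs are below) =====
def Claim_equal_parse_symbols_py : Prop := ∀ (raw : String), Dom_parse_symbols_py raw → Spec_parse_symbols_py raw (parse_symbols_py raw)

-- ===== LEMMAS AND PROOFS =====

-- words of a char list, splitting on the delimiter predicate p; w = word in progress
def pvWords (p : Char → Bool) : List Char → List Char → List (List Char)
  | w, [] => if w = [] then [] else [w]
  | w, c :: rest =>
      if p c then (if w = [] then pvWords p [] rest else w :: pvWords p [] rest)
      else pvWords p (w ++ [c]) rest

-- comma split with reversed word-in-progress accumulator (mirrors splitOn.go)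
def pvCommaSplit : List Char → List Char → List (List Char)
  | cur, [] => [cur.reverse]
  | cur, c :: rest =>
      if c = ',' then cur.reverse :: pvCommaSplit [] rest else pvCommaSplit (c :: cur) rest

def pvIsD (c : Char) : Bool := [';', '|', ','].contains c || PySem.Chars.isspace c
def pvIsD' (c : Char) : Bool := c == ',' || PySem.Chars.isspace c
def pvF (c : Char) : Char := if c = ';' then ',' else if c = '|' then ',' else c
def pvTok (t : List Char) : String := String.ofList (PySem.Chars.upper t)

theorem pv_replace_go (a b : Char) :
    ∀ (fuel : Nat) (cs acc : List Char), cs.length ≤ fuel →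
      PySem.Chars.replace.go [a] [b] fuel cs acc
        = acc.reverse ++ cs.map (fun c => if c = a then b else c) := by
  intro fuel
  induction fuel with
  | zero =>
    intro cs acc h
    have : cs = [] := List.length_eq_zero_iff.mp (Nat.le_zero.mp h)
    subst this
    simp [PySem.Chars.replace.go]
  | succ n ih =>
    intro cs acc h
    match cs with
    | [] => simp [PySem.Chars.replace.go]
    | c :: t =>
      simp only [PySem.Chars.replace.go]
      by_cases hc : c = a
      · subst hc
        rw [if_pos (by simp)]
        simp only [List.length_cons, List.length_nil, Nat.zero_add, List.drop_one,
          List.tail_cons, List.reverse_singleton, List.singleton_append]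
        rw [ih t (b :: acc) (by simpa using Nat.le_of_succ_le_succ h)]
        simp
      · rw [if_neg (by simp [List.isPrefixOf]; exact fun h' => hc h'.symm),
          ih t (c :: acc) (by simpa using Nat.le_of_succ_le_succ h)]
        simp [hc]

theorem pv_replace_eq (a b : Char) (cs : List Char) :
    PySem.Chars.replace cs [a] [b] = cs.map (fun c => if c = a then b else c) := by
  simp only [PySem.Chars.replace]
  rw [if_neg (by simp), pv_replace_go a b cs.length cs [] le_rfl]
  simp

theorem pv_splitOn_go :
    ∀ (fuel : Nat) (cs cur : List Char) (acc : List (List Char)), cs.length ≤ fuel →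
      PySem.Chars.splitOn.go [','] fuel cs cur acc = acc.reverse ++ pvCommaSplit cur cs := by
  intro fuel
  induction fuel with
  | zero =>
    intro cs cur acc h
    have : cs = [] := List.length_eq_zero_iff.mp (Nat.le_zero.mp h)
    subst this
    simp [PySem.Chars.splitOn.go, pvCommaSplit]
  | succ n ih =>
    intro cs cur acc h
    match cs with
    | [] => simp [PySem.Chars.splitOn.go, pvCommaSplit]
    | c :: t =>
      simp only [PySem.Chars.splitOn.go]
      by_cases hc : c = ','
      · subst hc
        rw [if_pos (by simp)]
        simp only [List.length_cons, List.length_nil, Nat.zero_add, List.drop_one,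
          List.tail_cons]
        rw [ih t [] (cur.reverse :: acc) (by simpa using Nat.le_of_succ_le_succ h)]
        simp [pvCommaSplit]
      · rw [if_neg (by simp [List.isPrefixOf]; exact fun h' => hc h'.symm),
          ih t (c :: cur) acc (by simpa using Nat.le_of_succ_le_succ h)]
        simp [pvCommaSplit, hc]

theorem pv_splitOn_eq (cs : List Char) :
    PySem.Chars.splitOn cs [','] = pvCommaSplit [] cs := by
  simpa using pv_splitOn_go (cs.length + 1) cs [] [] (by omega)

theorem pv_split₀_go :
    ∀ (cs cur : List Char) (acc : List (List Char)),
      PySem.Chars.split₀.go cs cur acc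
        = acc.reverse ++ pvWords PySem.Chars.isspace cur.reverse cs := by
  intro cs
  induction cs with
  | nil =>
    intro cur acc
    simp only [PySem.Chars.split₀.go, pvWords]
    split_ifs with h1 h2 <;> simp_all
  | cons c t ih =>
    intro cur acc
    simp only [PySem.Chars.split₀.go, pvWords]
    by_cases hc : PySem.Chars.isspace c
    · rw [if_pos hc, if_pos hc]
      by_cases hcur : cur = []
      · subst hcur; simp [ih]
      · rw [if_neg (by simpa using hcur), if_neg (by simpa using hcur), ih]
        simp
    · rw [if_neg hc, if_neg hc, ih]
      simp

theorem pv_split₀_eq (cs : List Char) :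
    PySem.Chars.split₀ cs = pvWords PySem.Chars.isspace [] cs := by
  simpa using pv_split₀_go cs [] []

theorem pvWords_congr (p q : Char → Bool) :
    ∀ (l w : List Char), (∀ c ∈ l, p c = q c) → pvWords p w l = pvWords q w l := by
  intro l
  induction l with
  | nil => intro w h; simp [pvWords]
  | cons c rest ih =>
    intro w h
    have hc : p c = q c := h c (by simp)
    have hrest : ∀ c ∈ rest, p c = q c := fun c hcm => h c (by simp [hcm])
    simp only [pvWords, hc]
    split_ifs <;> simp [ih _ hrest]

theorem pvWords_ne_nil (p : Char → Bool) :
    ∀ (l w : List Char) (t : List Char), t ∈ pvWords p w l → t ≠ [] := by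
  intro l
  induction l with
  | nil => intro w t ht; simp only [pvWords] at ht; split_ifs at ht <;> simp_all
  | cons c rest ih =>
    intro w t ht
    simp only [pvWords] at ht
    split_ifs at ht with h1 h2
    · exact ih [] t ht
    · rcases List.mem_cons.mp ht with rfl | ht
      · exact h2
      · exact ih [] t ht
    · exact ih (w ++ [c]) t ht

theorem pvWords_all_space :
    ∀ (sp w : List Char), (∀ c ∈ sp, PySem.Chars.isspace c = true) →
      pvWords PySem.Chars.isspace w sp = if w = [] then [] else [w] := by
  intro sp
  induction sp with
  | nil => intro w _; simp [pvWords]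
  | cons c rest ih =>
    intro w h
    have hc := h c (by simp)
    have hr : ∀ c ∈ rest, PySem.Chars.isspace c = true := fun c hcm => h c (by simp [hcm])
    simp only [pvWords, hc]
    split_ifs with hw <;> simp [ih _ hr]

theorem pvWords_append_spaces :
    ∀ (l sp w : List Char), (∀ c ∈ sp, PySem.Chars.isspace c = true) →
      pvWords PySem.Chars.isspace w (l ++ sp) = pvWords PySem.Chars.isspace w l := by
  intro l
  induction l with
  | nil => intro sp w h; simpa [pvWords] using pvWords_all_space sp w h
  | cons c rest ih =>
    intro sp w h
    simp only [List.cons_append, pvWords]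
    split_ifs <;> simp [ih _ _ h]

theorem pvWords_lstrip :
    ∀ (l : List Char),
      pvWords PySem.Chars.isspace [] (List.dropWhile PySem.Chars.isspace l)
        = pvWords PySem.Chars.isspace [] l := by
  intro l
  induction l with
  | nil => simp
  | cons c rest ih =>
    by_cases hc : PySem.Chars.isspace c
    · simp [hc, ih, pvWords]
    · simp [hc]

theorem pvWords_rstrip (l : List Char) :
    pvWords PySem.Chars.isspace [] (PySem.Chars.rstrip l)
      = pvWords PySem.Chars.isspace [] l := by
  have hdec : l = PySem.Chars.rstrip l ++ (List.takeWhile PySem.Chars.isspace l.reverse).reverse := by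
    have h0 := List.takeWhile_append_dropWhile (p := PySem.Chars.isspace) (l := l.reverse)
    have h2 := congrArg List.reverse h0
    simp only [List.reverse_append, List.reverse_reverse] at h2
    simp only [PySem.Chars.rstrip]
    exact h2.symm
  have hsp : ∀ c ∈ (List.takeWhile PySem.Chars.isspace l.reverse).reverse, PySem.Chars.isspace c = true := by
    intro c hc
    exact List.mem_takeWhile_imp (List.mem_reverse.mp hc)
  conv_rhs => rw [hdec]
  rw [pvWords_append_spaces _ _ _ hsp]

theorem pvWords_strip (s : List Char) :
    pvWords PySem.Chars.isspace [] (PySem.Chars.strip s)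
      = pvWords PySem.Chars.isspace [] s := by
  simp only [PySem.Chars.strip, PySem.Chars.lstrip]
  rw [pvWords_rstrip, pvWords_lstrip]

theorem pv_chunk_split :
    ∀ (xs : List Char), (∀ c ∈ xs, c ≠ ',') → ∀ (t w : List Char),
      pvWords pvIsD' w (xs ++ ',' :: t)
        = pvWords PySem.Chars.isspace w xs ++ pvWords pvIsD' [] t := by
  intro xs
  induction xs with
  | nil =>
    intro _ t w
    simp only [List.nil_append, pvWords, pvIsD']
    norm_num
    split_ifs <;> simp
  | cons c rest ih =>
    intro h t w
    have hc : c ≠ ',' := h c (by simp)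
    have hr : ∀ c ∈ rest, c ≠ ',' := fun c hcm => h c (by simp [hcm])
    have hd : pvIsD' c = PySem.Chars.isspace c := by simp [pvIsD', hc]
    simp only [List.cons_append, pvWords, hd]
    split_ifs <;> simp [ih hr]

theorem pv_flat_commaSplit :
    ∀ (l cur : List Char), (∀ c ∈ cur, c ≠ ',') →
      (pvCommaSplit cur l).flatMap (pvWords PySem.Chars.isspace [])
        = pvWords pvIsD' [] (cur.reverse ++ l) := by
  intro l
  induction l with
  | nil =>
    intro cur h
    simp only [pvCommaSplit, List.flatMap_cons, List.flatMap_nil, List.append_nil]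
    exact pvWords_congr _ _ _ _ (fun c hc => by
      simp [pvIsD', h c (List.mem_reverse.mp hc)])
  | cons c rest ih =>
    intro cur h
    by_cases hc : c = ','
    · subst hc
      rw [show pvCommaSplit cur (',' :: rest) = cur.reverse :: pvCommaSplit [] rest from by
        simp [pvCommaSplit]]
      simp only [List.flatMap_cons]
      rw [ih [] (by simp), pv_chunk_split cur.reverse (fun c hc => h c (List.mem_reverse.mp hc))]
      simp
    · simp only [pvCommaSplit, if_neg hc]
      rw [ih (c :: cur) (by intro x hx; rcases List.mem_cons.mp hx with rfl | hx; exact hc; exact h x hx)]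
      simp

theorem pvWords_map_f :
    ∀ (l w : List Char), pvWords pvIsD' w (l.map pvF) = pvWords pvIsD w l := by
  intro l
  induction l with
  | nil => intro w; simp [pvWords]
  | cons c rest ih =>
    intro w
    have hf : ¬ c = ';' → ¬ c = '|' → pvF c = c := by
      intro h1 h2; simp [pvF, h1, h2]
    have hd : pvIsD' (pvF c) = pvIsD c := by
      by_cases h1 : c = ';'
      · subst h1; decide
      by_cases h2 : c = '|'
      · subst h2; decide
      rw [hf h1 h2]
      simp [pvIsD', pvIsD, h1, h2, Bool.beq_eq_decide_eq]
    by_cases hD : pvIsD c = true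
    · simp only [List.map_cons, pvWords, hd, hD, if_pos]
      split_ifs <;> simp [ih]
    · have h1 : ¬ c = ';' := fun h => hD (by subst h; decide)
      have h2 : ¬ c = '|' := fun h => hD (by subst h; decide)
      have hd' : ¬ pvIsD' c = true := by rw [← hf h1 h2, hd]; exact hD
      simp only [List.map_cons, pvWords, hf h1 h2, if_neg hd', if_neg hD]
      exact ih (w ++ [c])

theorem pv_altGo_eq :
    ∀ (cs cur : List Char) (parts : List String),
      parse_symbols_py_alt_go cs cur parts = parts ++ (pvWords pvIsD cur cs).map pvTok := by
  intro cs
  induction cs with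
  | nil =>
    intro cur parts
    simp only [parse_symbols_py_alt_go, pvWords]
    split_ifs <;> simp [pvTok]
  | cons c rest ih =>
    intro cur parts
    simp only [parse_symbols_py_alt_go, pvWords, pvIsD]
    split_ifs with h1 h2 <;> simp [ih, pvTok]

theorem pv_A_eq (raw : String) :
    parse_symbols_py raw = (pvWords pvIsD' [] (raw.toList.map pvF)).map pvTok := by
  unfold parse_symbols_py
  rw [pv_replace_eq, pv_replace_eq]
  rw [List.map_map]
  rw [show ((fun c => if c = '|' then ',' else c) ∘ fun c => if c = ';' then ',' else c) = pvF by
    funext c; by_cases h1 : c = ';' <;> by_cases h2 : c = '|' <;> simp [pvF, h1, h2]]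
  rw [pv_splitOn_eq]
  have hstep : ∀ (parts : List String) (chunk : List Char),
      (fun parts chunk =>
        let chunk2 := PySem.Chars.strip chunk
        if chunk2 = [] then parts
        else (PySem.Chars.split₀ chunk2).foldl
          (fun parts token =>
            if token = [] then parts
            else parts ++ [String.ofList (PySem.Chars.upper token)])
          parts) parts chunk
      = parts ++ (pvWords PySem.Chars.isspace [] chunk).map pvTok := by
    intro parts chunk
    simp only
    by_cases hs : PySem.Chars.strip chunk = []
    · rw [if_pos hs]
      have : pvWords PySem.Chars.isspace [] chunk = [] := by
        rw [← pvWords_strip, hs]; simp [pvWords]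
      simp [this]
    · rw [if_neg hs, pv_split₀_eq, pvWords_strip]
      have hcongr := PySem.List.foldl_congr_mem
        (f := fun parts token =>
          if token = [] then parts else parts ++ [String.ofList (PySem.Chars.upper token)])
        (g := fun parts token => parts ++ [pvTok token])
        (l := pvWords PySem.Chars.isspace [] chunk) (init := parts)
        (by intro acc x hx
            show (if x = [] then acc else acc ++ [String.ofList (PySem.Chars.upper x)])
              = acc ++ [pvTok x]
            rw [if_neg (pvWords_ne_nil _ _ _ _ hx)]
            rfl)
      rw [hcongr, PySem.List.foldl_append_singleton_eq_map]
  rw [funext fun parts => funext fun chunk => hstep parts chunk]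
  rw [PySem.List.foldl_append_eq_flatMap]
  rw [← List.map_flatMap]
  rw [pv_flat_commaSplit _ [] (by simp)]
  simp

-- ===== VERDICT (by name: the statement is the Claim_ definition above) =====
theorem parse_symbols_py_spec : Claim_equal_parse_symbols_py := by
  intro raw _
  unfold Spec_parse_symbols_py parse_symbols_py_alt
  rw [pv_A_eq, pv_altGo_eq, pvWords_map_f, List.nil_append]
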